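-- pv_equiv track=rewrite | github.com/cscosu/buckeyectf-2023-public | rev-tape/make_flag_checker.py | print_text
-- ===== SOURCE A (Python) =====
-- def add_instructions(instructions):
--     count = 0
--     out = ""
--     for line in instructions:
--         out += line + "\n"
--         if line and line[0] != "#":
--             count += 1
--             if "PUSH" in line:
--                 count += 1
--
--     return (out, count)
--
-- def print_text(text: str):
--     text = text.encode()
--     instructions = []
--     for b in text:
--         instructions.append("PUSH =" + hex(b))
--         instructions.append("PRINT")
--
--     out, count = add_instructions(instructions)
--
--     return out, count
-- ===== SOURCE B (Python) =====
-- def print_text(text: str):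
--     data = text.encode()
--     return "".join(f"PUSH =0x{b:x}\nPRINT\n" for b in data), 3 * len(data)
-- ===== Notes on version B (the rewrite author's own statement) =====
-- stated objective: simpler
-- what changed: B drops the intermediate instructions list and the generic line-classification fold entirely: a single join over the bytes emits each two-line PUSH/PRINT block directly via f-string formatting, and the count is the closed form 3*len(data).
import Mathlib
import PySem

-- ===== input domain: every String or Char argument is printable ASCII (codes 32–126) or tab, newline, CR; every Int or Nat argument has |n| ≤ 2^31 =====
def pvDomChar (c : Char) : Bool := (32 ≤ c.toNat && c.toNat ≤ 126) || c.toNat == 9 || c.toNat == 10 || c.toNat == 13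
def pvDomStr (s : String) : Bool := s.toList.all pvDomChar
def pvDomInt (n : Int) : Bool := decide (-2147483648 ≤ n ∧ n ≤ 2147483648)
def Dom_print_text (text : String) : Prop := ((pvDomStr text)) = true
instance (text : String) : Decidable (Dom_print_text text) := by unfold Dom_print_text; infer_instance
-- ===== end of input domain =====

-- B drops the intermediate instructions list and the line-classification pass: it emits
-- each "PUSH =0x..\nPRINT\n" block directly per byte and counts by the closed form
-- 3*len(data); objective: simpler.

-- ===== PORT A =====
-- hex(b) for a Nat (b ≥ 0 in this program): "0x" + lowercase hex digits, most
-- significant first, accumulated at the front.  Exact for nonnegative arguments,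
-- the only values hex receives here (byte values).
def pyHexDigit (n : Nat) : Char := if n < 10 then Char.ofNat (48 + n) else Char.ofNat (87 + n)

def pyHexAux (n : Nat) (acc : List Char) : List Char :=
  if h : n = 0 then acc else pyHexAux (n / 16) (pyHexDigit (n % 16) :: acc)
  termination_by n
  decreasing_by exact Nat.div_lt_self (Nat.pos_of_ne_zero h) (by norm_num)

def pyHexChars (n : Nat) : List Char :=
  '0' :: 'x' :: (if n = 0 then ['0'] else pyHexAux n [])

-- the two instruction lines of A, as char lists ("PUSH =" + hex(b), "PRINT")
def pushChars (b : Nat) : List Char := ['P', 'U', 'S', 'H', ' ', '='] ++ pyHexChars b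

def printChars : List Char := ['P', 'R', 'I', 'N', 'T']

-- literal port of add_instructions (strings handled as char lists, PySem.Chars style)
def addInstructions (instructions : List (List Char)) : String × Int :=
  let r := instructions.foldl
    (fun (st : List Char × Int) line =>
      let out := st.1 ++ line ++ ['\n']
      let count :=
        if line ≠ [] ∧ PySem.List.pyGet? line 0 ≠ some '#' then
          let c := st.2 + 1
          if PySem.Chars.isIn ['P', 'U', 'S', 'H'] line then c + 1 else c
        else st.2
      (out, count))
    ([], 0)
  (String.ofList r.1, r.2)

def print_text (text : String) : String × Int :=
  -- text.encode(): on the ASCII domain, the list of character codes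
  let data := text.toList.map (fun c => c.toNat)
  let instructions := data.foldl (fun acc b => (acc ++ [pushChars b]) ++ [printChars]) []
  addInstructions instructions

-- ===== PORT B =====
-- f"{b:x}": hex digits by table lookup, least significant first, reversed at the end
def altDigit (m : Nat) : Char := "0123456789abcdef".toList.getD m '0'

def altHexRev (n : Nat) : List Char :=
  if h : n = 0 then [] else altDigit (n % 16) :: altHexRev (n / 16)
  termination_by n
  decreasing_by exact Nat.div_lt_self (Nat.pos_of_ne_zero h) (by norm_num)

def altHex (n : Nat) : List Char := if n = 0 then ['0'] else (altHexRev n).reverse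

-- one emitted block per byte: f"PUSH =0x{b:x}\nPRINT\n"
def altBlock (b : Nat) : List Char := "PUSH =0x".toList ++ altHex b ++ "\nPRINT\n".toList

-- join over the generator = right fold concatenating the blocks in order
def print_text_alt (text : String) : String × Int :=
  (String.ofList (text.toList.foldr (fun c acc => altBlock c.toNat ++ acc) []),
   3 * (text.toList.length : Int))

-- ===== PRECONDITION & SPEC =====
def Spec_print_text (text : String) (out : String × Int) : Prop := out = print_text_alt text
instance (text : String) (out : String × Int) : Decidable (Spec_print_text text out) := by unfold Spec_print_text; infer_instance

-- ===== CLAIM (what is proved, stated in full; the proofs are below) =====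
def Claim_equal_print_text : Prop := ∀ (text : String), Dom_print_text text → Spec_print_text text (print_text text)

-- ===== LEMMAS AND PROOFS =====

-- the loop body of add_instructions, named so the fold lemmas can speak about it
def stepFn (st : List Char × Int) (line : List Char) : List Char × Int :=
  let out := st.1 ++ line ++ ['\n']
  let count :=
    if line ≠ [] ∧ PySem.List.pyGet? line 0 ≠ some '#' then
      let c := st.2 + 1
      if PySem.Chars.isIn ['P', 'U', 'S', 'H'] line then c + 1 else c
    else st.2
  (out, count)

-- A's block for one byte: the PUSH line, newline, the PRINT line, newline
def blockChars (b : Nat) : List Char := pushChars b ++ '\n' :: printChars ++ ['\n']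

theorem pushChars_cons (b : Nat) :
    pushChars b = 'P' :: 'U' :: 'S' :: 'H' :: ' ' :: '=' :: pyHexChars b := rfl

theorem isIn_pushChars (b : Nat) :
    PySem.Chars.isIn ['P', 'U', 'S', 'H'] (pushChars b) = true := by
  rw [PySem.Chars.isIn_iff_infix, pushChars_cons]
  exact List.IsPrefix.isInfix ⟨' ' :: '=' :: pyHexChars b, rfl⟩

theorem pyGet?_pushChars (b : Nat) : PySem.List.pyGet? (pushChars b) 0 = some 'P' := by
  rw [pushChars_cons]
  simp [PySem.List.pyGet?, PySem.List.pyIdx?]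
  rw [if_pos (by positivity)]
  rfl

-- a PUSH line counts 2 (non-comment, contains "PUSH")
theorem step_push (st : List Char × Int) (b : Nat) :
    stepFn st (pushChars b) = (st.1 ++ pushChars b ++ ['\n'], st.2 + 2) := by
  unfold stepFn
  rw [if_pos ⟨by rw [pushChars_cons]; simp, by rw [pyGet?_pushChars]; simp⟩,
    if_pos (isIn_pushChars b)]
  simp
  ring

-- a PRINT line counts 1 (non-comment, no "PUSH")
theorem step_print (st : List Char × Int) :
    stepFn st printChars = (st.1 ++ printChars ++ ['\n'], st.2 + 1) := by
  unfold stepFn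
  rw [if_pos ⟨by decide, by decide⟩, if_neg (by decide)]

-- the whole fold over A's instruction list, block by block
theorem fold_blocks (data : List Nat) (o : List Char) (c : Int) :
    (data.flatMap (fun b => [pushChars b, printChars])).foldl stepFn (o, c)
    = (o ++ (data.map blockChars).flatten, c + 3 * (data.length : Int)) := by
  induction data generalizing o c with
  | nil => simp
  | cons b rest ih =>
    rw [List.flatMap_cons, List.foldl_append]
    simp only [List.foldl_cons, List.foldl_nil, step_push, step_print]
    rw [ih]
    refine Prod.ext ?_ ?_
    · simp [blockChars, List.append_assoc]
    · simp; ring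

-- A's instruction list is exactly the flatMap of the two lines per byte
theorem instrs_eq (data : List Nat) :
    data.foldl (fun acc b => (acc ++ [pushChars b]) ++ [printChars]) []
      = data.flatMap (fun b => [pushChars b, printChars]) := by
  rw [show (fun (acc : List (List Char)) (b : Nat) => (acc ++ [pushChars b]) ++ [printChars])
        = (fun acc b => acc ++ [pushChars b, printChars]) from by
      funext acc b; simp]
  rw [PySem.List.foldl_append_eq_flatMap]
  simp

-- the two hex-digit functions agree on 0..15
theorem digit_eq (m : Nat) (h : m < 16) : pyHexDigit m = altDigit m := by
  interval_cases m <;> decide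

-- A's front-accumulating hex loop = B's LSB-first list, reversed
theorem hexAux_eq (n : Nat) (acc : List Char) :
    pyHexAux n acc = (altHexRev n).reverse ++ acc := by
  induction n, acc using pyHexAux.induct with
  | case1 acc => simp [pyHexAux, altHexRev]
  | case2 n acc h ih =>
    rw [pyHexAux, dif_neg h, ih]
    conv_rhs => rw [altHexRev, dif_neg h]
    rw [digit_eq _ (Nat.mod_lt _ (by norm_num))]
    simp

-- the two per-byte blocks coincide
theorem block_eq (b : Nat) : blockChars b = altBlock b := by
  by_cases h : b = 0
  · subst h; decide
  · simp only [blockChars, altBlock, pushChars, pyHexChars, altHex, if_neg h,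
      hexAux_eq b []]
    simp
    rfl

-- B's right fold is the flattened list of A's blocks
theorem foldr_blocks (l : List Char) :
    l.foldr (fun c acc => altBlock c.toNat ++ acc) []
      = ((l.map (fun c => c.toNat)).map blockChars).flatten := by
  induction l with
  | nil => rfl
  | cons c rest ih => simp [ih, block_eq]

-- ===== VERDICT (by name: the statement is the Claim_ definition above) =====
theorem print_text_spec : Claim_equal_print_text := by
  intro text _
  unfold Spec_print_text print_text print_text_alt addInstructions
  simp only []
  rw [instrs_eq]
  rw [show (fun (st : List Char × Int) (line : List Char) =>
      let out := st.1 ++ line ++ ['\n']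
      let count :=
        if line ≠ [] ∧ PySem.List.pyGet? line 0 ≠ some '#' then
          let c := st.2 + 1
          if PySem.Chars.isIn ['P', 'U', 'S', 'H'] line then c + 1 else c
      else st.2
      (out, count)) = stepFn from rfl]
  rw [fold_blocks, foldr_blocks]
  simp
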